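-- pv_equiv track=rewrite | github.com/Avuii/VigenereCipher | mainpl.py | generuj_haslo_o_dlugosci_ze_wzorca
-- ===== SOURCE A (Python) =====
-- ALFABET = "ABCDEFGHIJKLMNOPQRSTUVWXYZ0123456789"
--
-- def przygotuj_haslo(haslo):
--     haslo = haslo.upper()
--     wynik = ""
--
--     for znak in haslo:
--         if znak in ALFABET:
--             wynik += znak
--
--     return wynik
--
-- def generuj_haslo_o_dlugosci_ze_wzorca(wzorzec, dlugosc):
--     wzorzec_po_przygotowaniu = przygotuj_haslo(wzorzec)
--
--     if len(wzorzec_po_przygotowaniu) == 0: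
--         return ""
--
--     wynik = ""
--     i = 0
--
--     while len(wynik) < dlugosc:
--         wynik += wzorzec_po_przygotowaniu[i % len(wzorzec_po_przygotowaniu)]
--         i += 1
--
--     return wynik
-- ===== SOURCE B (Python) =====
-- ALFABET = "ABCDEFGHIJKLMNOPQRSTUVWXYZ0123456789"
--
-- def przygotuj_haslo(haslo):
--     haslo = haslo.upper()
--     wynik = ""
--
--     for znak in haslo:
--         if znak in ALFABET:
--             wynik += znak
--
--     return wynik
--
-- def generuj_haslo_o_dlugosci_ze_wzorca(wzorzec, dlugosc):
--     wzorzec_po_przygotowaniu = przygotuj_haslo(wzorzec)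
--
--     if len(wzorzec_po_przygotowaniu) == 0:
--         return ""
--
--     powtorzenia = wzorzec_po_przygotowaniu * (dlugosc // len(wzorzec_po_przygotowaniu) + 1)
--     return powtorzenia[:dlugosc]
-- ===== Notes on version B (the rewrite author's own statement) =====
-- stated objective: faster
-- what changed: Replaces the character-by-character while loop (appending pattern[i % len] until the length is reached) with a closed-form build: multiply the cleaned pattern by dlugosc // len + 1 and slice to dlugosc.
import Mathlib
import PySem

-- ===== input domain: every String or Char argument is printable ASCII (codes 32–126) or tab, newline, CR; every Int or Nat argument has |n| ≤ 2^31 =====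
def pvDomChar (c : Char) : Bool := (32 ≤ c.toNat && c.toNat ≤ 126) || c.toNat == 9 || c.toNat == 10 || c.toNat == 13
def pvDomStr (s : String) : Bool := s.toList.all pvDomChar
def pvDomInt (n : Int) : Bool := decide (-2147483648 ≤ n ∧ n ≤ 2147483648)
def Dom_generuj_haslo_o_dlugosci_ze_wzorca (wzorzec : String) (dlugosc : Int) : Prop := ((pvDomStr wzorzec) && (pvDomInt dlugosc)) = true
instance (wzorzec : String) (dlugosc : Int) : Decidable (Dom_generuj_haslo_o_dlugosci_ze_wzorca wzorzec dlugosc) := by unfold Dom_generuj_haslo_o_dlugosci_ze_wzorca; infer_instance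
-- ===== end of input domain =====

-- B replaces A's one-character-at-a-time while loop by multiplying the cleaned pattern
-- (dlugosc // len + 1) times and slicing to dlugosc (idiomatic closed-form build).

-- ===== PORT A =====

def pvALFABET : List Char := "ABCDEFGHIJKLMNOPQRSTUVWXYZ0123456789".toList

-- shared helper: both Pythons contain this identical przygotuj_haslo
def przygotuj_haslo (haslo : List Char) : List Char :=
  (PySem.Chars.upper haslo).foldl
    (fun wynik znak => if PySem.Chars.isIn [znak] pvALFABET then wynik ++ [znak] else wynik) []

-- A's while loop; the index i % p.length is always in range, so getD is exact Python indexing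
def pvALoop (p : List Char) (hp : p ≠ []) (wynik : List Char) (i : Nat) (dlugosc : Int) : List Char :=
  if (wynik.length : Int) < dlugosc then
    pvALoop p hp (wynik ++ [p.getD (i % p.length) 'A']) (i + 1) dlugosc
  else wynik
termination_by (dlugosc - wynik.length).toNat
decreasing_by simp; omega

def generuj_haslo_o_dlugosci_ze_wzorca (wzorzec : String) (dlugosc : Int) : String :=
  let p := przygotuj_haslo wzorzec.toList
  if h : p.length = 0 then ""
  else String.ofList (pvALoop p (by intro hnil; simp [hnil] at h) [] 0 dlugosc)

-- ===== PORT B =====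

def generuj_haslo_o_dlugosci_ze_wzorca_alt (wzorzec : String) (dlugosc : Int) : String :=
  let p := przygotuj_haslo wzorzec.toList
  if p.length = 0 then ""
  else
    let powtorzenia := PySem.List.pyRepeat p (PySem.Int.floordiv dlugosc p.length + 1)
    String.ofList (PySem.List.slice powtorzenia none (some dlugosc))

-- ===== PRECONDITION & SPEC =====
def Spec_generuj_haslo_o_dlugosci_ze_wzorca (wzorzec : String) (dlugosc : Int) (out : String) : Prop := out = generuj_haslo_o_dlugosci_ze_wzorca_alt wzorzec dlugosc
instance (wzorzec : String) (dlugosc : Int) (out : String) : Decidable (Spec_generuj_haslo_o_dlugosci_ze_wzorca wzorzec dlugosc out) := by unfold Spec_generuj_haslo_o_dlugosci_ze_wzorca; infer_instance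

-- ===== CLAIM (what is proved, stated in full; the proofs are below) =====
def Claim_equal_generuj_haslo_o_dlugosci_ze_wzorca : Prop := ∀ (wzorzec : String) (dlugosc : Int), Dom_generuj_haslo_o_dlugosci_ze_wzorca wzorzec dlugosc → Spec_generuj_haslo_o_dlugosci_ze_wzorca wzorzec dlugosc (generuj_haslo_o_dlugosci_ze_wzorca wzorzec dlugosc)

-- ===== LEMMAS AND PROOFS =====

-- A's loop appends exactly (dlugosc - |wynik|)⁺ characters, the k-th being p[(i+k) % |p|]
theorem pvALoop_eq (p : List Char) (hp : p ≠ []) :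
    ∀ (n : ℕ) (wynik : List Char) (i : ℕ) (d : Int), (d - wynik.length).toNat = n →
      pvALoop p hp wynik i d
        = wynik ++ (List.range n).map (fun k => p.getD ((i + k) % p.length) 'A') := by
  intro n
  induction n with
  | zero =>
    intro wynik i d hn
    rw [pvALoop]
    simp only [List.range_zero, List.map_nil, List.append_nil]
    rw [if_neg (by omega)]
  | succ n ih =>
    intro wynik i d hn
    rw [pvALoop, if_pos (by omega)]
    rw [ih (wynik ++ [p.getD (i % p.length) 'A']) (i + 1) d (by simp; omega)]
    rw [List.range_succ_eq_map]
    simp only [List.map_cons, List.map_map, Function.comp_def, List.append_assoc,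
      List.singleton_append, Nat.add_zero]
    congr 1
    congr 1
    apply List.map_congr_left
    intro k _
    congr 2
    omega

-- taking m ≤ K·|p| characters of p repeated K times yields p[k % |p|] at position k
theorem take_flatten_replicate (p : List Char) :
    ∀ (K m : ℕ), m ≤ K * p.length →
      ((List.replicate K p).flatten).take m
        = (List.range m).map (fun k => p.getD (k % p.length) 'A') := by
  intro K
  induction K with
  | zero =>
    intro m hm
    simp at hm
    simp [hm]
  | succ K ih =>
    intro m hm
    rw [List.replicate_succ, List.flatten_cons]
    by_cases hmL : m ≤ p.length
    · rw [List.take_append_of_le_length (by simpa using hmL)]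
      apply List.ext_getElem
      · simp; omega
      · intro j hj _
        simp only [List.getElem_take, List.getElem_map, List.getElem_range]
        have hjL : j < p.length := by simp at hj; omega
        rw [Nat.mod_eq_of_lt hjL, List.getD_eq_getElem p 'A' hjL]
    · push_neg at hmL
      rw [show m = p.length + (m - p.length) from by omega, List.take_append,
        List.take_of_length_le (Nat.le_add_right _ _), Nat.add_sub_cancel_left,
        List.range_add, List.map_append]
      congr 1
      · -- first block: the whole of p
        apply List.ext_getElem
        · simp
        · intro j hj _
          simp only [List.getElem_map, List.getElem_range]
          rw [Nat.mod_eq_of_lt hj, List.getD_eq_getElem p 'A' hj]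
      · have hK : (K + 1) * p.length = K * p.length + p.length := by ring
        rw [ih (m - p.length) (by omega), List.map_map]

        apply List.map_congr_left
        intro k _
        simp [Nat.add_mod_left]

theorem generuj_core (p : List Char) (hp : p ≠ []) (d : Int) :
    pvALoop p hp [] 0 d
      = PySem.List.slice (PySem.List.pyRepeat p (PySem.Int.floordiv d p.length + 1)) none (some d) := by
  have hL : 0 < (p.length : Int) := by
    have := List.length_pos_of_ne_nil hp
    exact_mod_cast this
  rw [pvALoop_eq p hp (d.toNat) [] 0 d (by simp)]
  simp only [List.nil_append, Nat.zero_add]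
  by_cases hd : 0 ≤ d
  · rw [PySem.List.slice_to _ hd]
    have hrep : PySem.List.pyRepeat p (PySem.Int.floordiv d p.length + 1)
        = (List.replicate (PySem.Int.floordiv d p.length + 1).toNat p).flatten := by
      simp [PySem.List.pyRepeat]
    rw [hrep, take_flatten_replicate p _ d.toNat ?_]
    · -- d.toNat ≤ (d // L + 1).toNat * L
      rw [PySem.Int.floordiv_eq_ediv_of_pos hL]
      have h1 : (p.length : Int) * (d / (p.length : Int)) + d % (p.length : Int) = d :=
        Int.mul_ediv_add_emod d (p.length : Int)
      have h2 : d % (p.length : Int) < (p.length : Int) := Int.emod_lt_of_pos d hL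
      have h3 : 0 ≤ d / (p.length : Int) := Int.ediv_nonneg hd (le_of_lt hL)
      zify
      rw [Int.toNat_of_nonneg hd, Int.toNat_of_nonneg (by omega)]
      nlinarith
  · push_neg at hd
    have hK : (PySem.Int.floordiv d p.length + 1).toNat = 0 := by
      rw [PySem.Int.floordiv_eq_ediv_of_pos hL]
      have h1 : (p.length : Int) * (d / (p.length : Int)) + d % (p.length : Int) = d :=
        Int.mul_ediv_add_emod d (p.length : Int)
      have h2 := Int.emod_nonneg d (ne_of_gt hL)
      have hq : d / (p.length : Int) < 0 := by nlinarith
      omega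
    have hdn : d.toNat = 0 := by omega
    simp [hdn, PySem.List.pyRepeat, hK, PySem.List.slice]

-- ===== VERDICT (by name: the statement is the Claim_ definition above) =====
theorem generuj_haslo_o_dlugosci_ze_wzorca_spec : Claim_equal_generuj_haslo_o_dlugosci_ze_wzorca := by
  intro wzorzec dlugosc _
  unfold Spec_generuj_haslo_o_dlugosci_ze_wzorca
  unfold generuj_haslo_o_dlugosci_ze_wzorca generuj_haslo_o_dlugosci_ze_wzorca_alt
  by_cases h : (przygotuj_haslo wzorzec.toList).length = 0
  · simp [h]
  · simp only [h, dite_false, if_false]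
    rw [generuj_core]
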